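-- pv_equiv track=rewrite | github.com/michaelayoade/dotmac_erp | scripts/fix_required_asterisks.py | extract_full_tag
-- ===== SOURCE A (Python) =====
-- def extract_full_tag(lines: list[str], start_idx: int, start_col: int) -> str:
--     """Extract a complete HTML tag spanning multiple lines."""
--     combined = ""
--     for i in range(start_idx, min(start_idx + 12, len(lines))):
--         if i == start_idx:
--             combined += lines[i][start_col:]
--         else:
--             combined += "\n" + lines[i]
--         in_quote = None
--         found_close = False
--         for ch in combined:
--             if in_quote:
--                 if ch == in_quote:
--                     in_quote = None
--                 continue
--             if ch in ('"', "'"):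
--                 in_quote = ch
--                 continue
--             if ch == ">":
--                 found_close = True
--                 break
--         if found_close:
--             return combined
--     return combined
-- ===== SOURCE B (Python) =====
-- def _find_close(s):
--     """Index of the first '>' outside quotes, or None."""
--     in_quote = None
--     for j, ch in enumerate(s):
--         if in_quote:
--             if ch == in_quote:
--                 in_quote = None
--         elif ch in ('"', "'"):
--             in_quote = ch
--         elif ch == ">":
--             return j
--     return None
--
--
-- def extract_full_tag(lines: list[str], start_idx: int, start_col: int) -> str:
--     """Extract a complete HTML tag spanning multiple lines (staged: build
--     the whole candidate text once, one scan for the close, then cut)."""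
--     end = min(start_idx + 12, len(lines))
--     pieces = [lines[i][start_col:] if i == start_idx else "\n" + lines[i]
--               for i in range(start_idx, end)]
--     full = "".join(pieces)
--     j = _find_close(full)
--     if j is None:
--         return full
--     acc = 0
--     for p in pieces:
--         acc += len(p)
--         if j < acc:
--             return full[:acc]
--     return full
-- ===== Notes on version B (the rewrite author's own statement) =====
-- stated objective: alternative
-- what changed: B replaces A's loop-and-rescan (append a line, rescan the whole accumulated string per line) with a staged pipeline: build all up-to-12 pieces at once, join them, run a single quote-aware scan returning the index of the first unquoted '>', then cut the joined text at the end of the piece containing that index.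
import Mathlib
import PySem

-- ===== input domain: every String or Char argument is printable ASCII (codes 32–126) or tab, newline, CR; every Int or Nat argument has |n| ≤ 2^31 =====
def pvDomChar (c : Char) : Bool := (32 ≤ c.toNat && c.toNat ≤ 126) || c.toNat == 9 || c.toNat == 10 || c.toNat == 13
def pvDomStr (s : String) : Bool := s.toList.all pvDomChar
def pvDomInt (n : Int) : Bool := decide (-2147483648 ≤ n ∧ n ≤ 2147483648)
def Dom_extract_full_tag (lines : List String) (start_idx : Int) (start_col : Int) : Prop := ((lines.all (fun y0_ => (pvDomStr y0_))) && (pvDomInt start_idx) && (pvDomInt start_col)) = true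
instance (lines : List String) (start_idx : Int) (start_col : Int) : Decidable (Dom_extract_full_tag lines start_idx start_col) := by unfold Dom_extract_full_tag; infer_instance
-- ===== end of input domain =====

-- B replaces A's append-then-rescan loop by a staged pipeline (build all pieces, join,
-- one indexed scan for the first unquoted '>', cut at that piece's end): alternative algorithm.

-- text appended at index i: lines[i][start_col:] for the first index, "\n" + lines[i] otherwise
-- (shared helper: both Pythons compute the per-line text by the same expression)
def pvNewText (lines : List String) (start_idx : Int) (start_col : Int) (i : Int) : List Char :=
  if i == start_idx then
    PySem.List.slice ((PySem.List.pyGetD lines i "").toList) (some start_col) none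
  else
    '\n' :: (PySem.List.pyGetD lines i "").toList

-- ===== PORT A =====
-- A's inner loop: fresh scan of all of `combined`, returns found_close
def pvScanA : List Char → Option Char → Bool
  | [], _ => false
  | c :: rest, some q => if c == q then pvScanA rest none else pvScanA rest (some q)
  | c :: rest, none =>
      if c == '"' || c == '\'' then pvScanA rest (some c)
      else if c == '>' then true
      else pvScanA rest none

def pvLoopA (lines : List String) (start_idx : Int) (start_col : Int) : List Int → List Char → List Char
  | [], combined => combined
  | i :: rest, combined =>
      let combined' := combined ++ pvNewText lines start_idx start_col i
      if pvScanA combined' none then combined'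
      else pvLoopA lines start_idx start_col rest combined'

def extract_full_tag (lines : List String) (start_idx : Int) (start_col : Int) : String :=
  String.ofList (pvLoopA lines start_idx start_col
    (PySem.List.pyRange start_idx (min (start_idx + 12) (lines.length : Int)) 1) [])

-- ===== PORT B =====
-- _find_close: index of the first '>' outside quotes (enumerate counter carried as j)
def pvFindClose : List Char → Option Char → Nat → Option Nat
  | [], _, _ => none
  | c :: rest, some q, j =>
      if c == q then pvFindClose rest none (j+1) else pvFindClose rest (some q) (j+1)
  | c :: rest, none, j =>
      if c == '"' || c == '\'' then pvFindClose rest (some c) (j+1)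
      else if c == '>' then some j
      else pvFindClose rest none (j+1)

-- the cut loop: first cumulative piece length acc with j < acc; return full[:acc]
def pvCut (j : Nat) (full : List Char) : Nat → List (List Char) → List Char
  | _, [] => full
  | acc, p :: ps =>
      let acc' := acc + p.length
      if j < acc' then full.take acc' else pvCut j full acc' ps

def extract_full_tag_alt (lines : List String) (start_idx : Int) (start_col : Int) : String :=
  let pieces := (PySem.List.pyRange start_idx (min (start_idx + 12) (lines.length : Int)) 1).map
      (fun i => pvNewText lines start_idx start_col i)
  let full := pieces.flatten
  match pvFindClose full none 0 with
  | none => String.ofList full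
  | some j => String.ofList (pvCut j full 0 pieces)

-- ===== PRECONDITION & SPEC =====
-- Pre_ excludes exactly the inputs where both Pythons raise IndexError:
-- start_idx < -len(lines) makes the first lines[start_idx] lookup fail.
def Pre_extract_full_tag (lines : List String) (start_idx : Int) (start_col : Int) : Prop :=
  -(lines.length : Int) ≤ start_idx
instance (lines : List String) (start_idx : Int) (start_col : Int) : Decidable (Pre_extract_full_tag lines start_idx start_col) := by unfold Pre_extract_full_tag; infer_instance

def pvWitness_extract_full_tag : List String × Int × Int := (["<div", "class='a>b'>"], 0, 0)

def Spec_extract_full_tag (lines : List String) (start_idx : Int) (start_col : Int) (out : String) : Prop := out = extract_full_tag_alt lines start_idx start_col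
instance (lines : List String) (start_idx : Int) (start_col : Int) (out : String) : Decidable (Spec_extract_full_tag lines start_idx start_col out) := by unfold Spec_extract_full_tag; infer_instance

-- ===== CLAIM (what is proved, stated in full; the proofs are below) =====
def Claim_equal_extract_full_tag : Prop := ∀ (lines : List String) (start_idx : Int) (start_col : Int), Dom_extract_full_tag lines start_idx start_col → Pre_extract_full_tag lines start_idx start_col → Spec_extract_full_tag lines start_idx start_col (extract_full_tag lines start_idx start_col)

-- ===== LEMMAS AND PROOFS =====

-- quote state after a scan that meets no unquoted '>' (proof-only)
def pvQAfter : List Char → Option Char → Option Char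
  | [], q => q
  | c :: rest, some q => if c == q then pvQAfter rest none else pvQAfter rest (some q)
  | c :: rest, none =>
      if c == '"' || c == '\'' then pvQAfter rest (some c) else pvQAfter rest none

-- A's loop restated over the list of pieces (proof-only)
def pvLoopP : List (List Char) → List Char → List Char
  | [], combined => combined
  | p :: ps, combined =>
      let combined' := combined ++ p
      if pvScanA combined' none then combined'
      else pvLoopP ps combined'

lemma pvLoopA_eq_loopP (lines : List String) (start_idx start_col : Int) :
    ∀ (idxs : List Int) (combined : List Char),
      pvLoopA lines start_idx start_col idxs combined
        = pvLoopP (idxs.map (fun i => pvNewText lines start_idx start_col i)) combined := by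
  intro idxs
  induction idxs with
  | nil => intro _; rfl
  | cons i rest ih =>
      intro combined
      simp only [pvLoopA, pvLoopP, List.map]
      split_ifs <;> simp [ih]

-- the enumerate counter only offsets the result
lemma pvFindClose_offset (s : List Char) : ∀ (q : Option Char) (j : Nat),
    pvFindClose s q j = (pvFindClose s q 0).map (j + ·) := by
  induction s with
  | nil => intro q j; cases q <;> rfl
  | cons c rest ih =>
      intro q j
      cases q with
      | some qc =>
          simp only [pvFindClose]
          split_ifs <;>
            · rw [ih _ (j+1), ih _ 1, Option.map_map]
              congr 1; funext x; simp; omega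
      | none =>
          simp only [pvFindClose]
          split_ifs <;> first
            | (rw [ih _ (j+1), ih _ 1, Option.map_map]
               congr 1; funext x; simp; omega)
            | simp

-- counter-invariance corollaries
lemma pvFindClose_isSome_off (s : List Char) (q : Option Char) (j : Nat) :
    (pvFindClose s q j).isSome = (pvFindClose s q 0).isSome := by
  rw [pvFindClose_offset]; cases pvFindClose s q 0 <;> simp

lemma pvFindClose_none_off (s : List Char) (q : Option Char) (j : Nat) :
    pvFindClose s q j = none ↔ pvFindClose s q 0 = none := by
  rw [pvFindClose_offset]; cases pvFindClose s q 0 <;> simp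

-- A's boolean scan is the isSome of B's index scan
lemma pvScanA_eq_isSome (s : List Char) : ∀ (q : Option Char),
    pvScanA s q = (pvFindClose s q 0).isSome := by
  induction s with
  | nil => intro q; cases q <;> rfl
  | cons c rest ih =>
      intro q
      cases q with
      | some qc =>
          simp only [pvScanA, pvFindClose]
          split_ifs <;> rw [ih, pvFindClose_isSome_off _ _ (0+1)]
      | none =>
          simp only [pvScanA, pvFindClose]
          split_ifs <;> first
            | (rw [ih, pvFindClose_isSome_off _ _ (0+1)])
            | simp

lemma pvFindClose_some_lt (s : List Char) : ∀ (q : Option Char) (j : Nat),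
    pvFindClose s q 0 = some j → j < s.length := by
  induction s with
  | nil => intro q j h; cases q <;> simp [pvFindClose] at h
  | cons c rest ih =>
      intro q j h
      cases q with
      | some qc =>
          simp only [pvFindClose] at h
          split_ifs at h <;>
            · rw [pvFindClose_offset] at h
              rcases Option.map_eq_some_iff.mp h with ⟨j', hj', rfl⟩
              have := ih _ _ hj'; simp; omega
      | none =>
          simp only [pvFindClose] at h
          split_ifs at h with h1 h2
          · rw [pvFindClose_offset] at h
            rcases Option.map_eq_some_iff.mp h with ⟨j', hj', rfl⟩
            have := ih _ _ hj'; simp; omega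
          · cases h; simp
          · rw [pvFindClose_offset] at h
            rcases Option.map_eq_some_iff.mp h with ⟨j', hj', rfl⟩
            have := ih _ _ hj'; simp; omega

lemma pvFindClose_append_some (s t : List Char) : ∀ (q : Option Char) (j : Nat),
    pvFindClose s q 0 = some j → pvFindClose (s ++ t) q 0 = some j := by
  induction s with
  | nil => intro q j h; cases q <;> simp [pvFindClose] at h
  | cons c rest ih =>
      intro q j h
      cases q with
      | some qc =>
          simp only [pvFindClose, List.cons_append] at h ⊢
          split_ifs at h ⊢ <;>
            · rw [pvFindClose_offset] at h ⊢
              rcases Option.map_eq_some_iff.mp h with ⟨j', hj', rfl⟩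
              rw [ih _ _ hj']; simp
      | none =>
          simp only [pvFindClose, List.cons_append] at h ⊢
          split_ifs at h ⊢ with h1 h2
          · rw [pvFindClose_offset] at h ⊢
            rcases Option.map_eq_some_iff.mp h with ⟨j', hj', rfl⟩
            rw [ih _ _ hj']; simp
          · exact h
          · rw [pvFindClose_offset] at h ⊢
            rcases Option.map_eq_some_iff.mp h with ⟨j', hj', rfl⟩
            rw [ih _ _ hj']; simp

lemma pvFindClose_append_none (s t : List Char) : ∀ (q : Option Char),
    pvFindClose s q 0 = none →
    pvFindClose (s ++ t) q 0 = (pvFindClose t (pvQAfter s q) 0).map (s.length + ·) := by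
  induction s with
  | nil =>
      intro q _
      simp only [List.nil_append, pvQAfter, List.length_nil]
      cases pvFindClose t q 0 <;> simp
  | cons c rest ih =>
      intro q h
      cases q with
      | some qc =>
          simp only [pvFindClose, pvQAfter, List.cons_append] at h ⊢
          split_ifs at h ⊢ <;>
            · rw [pvFindClose_none_off] at h
              rw [pvFindClose_offset, ih _ h, Option.map_map]
              cases pvFindClose t _ 0 <;> · simp; try omega
      | none =>
          simp only [pvFindClose, pvQAfter, List.cons_append] at h ⊢
          split_ifs at h ⊢ <;>
            · rw [pvFindClose_none_off] at h
              rw [pvFindClose_offset, ih _ h, Option.map_map]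
              cases pvFindClose t _ 0 <;> · simp; try omega

-- main invariant: A's per-piece loop equals B's staged find-then-cut computation
lemma pvLoopP_eq_staged : ∀ (ps : List (List Char)) (c : List Char),
    pvFindClose c none 0 = none →
    pvLoopP ps c =
      (match pvFindClose (c ++ ps.flatten) none 0 with
       | none => c ++ ps.flatten
       | some j => pvCut j (c ++ ps.flatten) c.length ps) := by
  intro ps
  induction ps with
  | nil => intro c h; simp [pvLoopP, h]
  | cons p ps' ih =>
      intro c h
      simp only [pvLoopP, List.flatten_cons]
      rcases hc' : pvFindClose (c ++ p) none 0 with _ | j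
      · -- no close yet within c ++ p
        have hA : pvScanA (c ++ p) none = false := by
          rw [pvScanA_eq_isSome, hc']; rfl
        have hfull : c ++ (p ++ ps'.flatten) = (c ++ p) ++ ps'.flatten := by
          simp [List.append_assoc]
        rw [hA, if_neg (by simp), ih (c ++ p) hc', hfull]
        rcases hf : pvFindClose ((c ++ p) ++ ps'.flatten) none 0 with _ | j
        · rfl
        · -- the close is beyond c ++ p: the cut loop skips the first piece
          have hge : (c ++ p).length ≤ j := by
            rw [pvFindClose_append_none _ _ _ hc'] at hf
            rcases Option.map_eq_some_iff.mp hf with ⟨j', _, rfl⟩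
            simp
          simp only [pvCut]
          rw [if_neg (by simp at hge ⊢; omega)]
          simp
      · -- close found within c ++ p: A returns c ++ p, B cuts at its end
        have hA : pvScanA (c ++ p) none = true := by
          rw [pvScanA_eq_isSome, hc']; rfl
        have hlt : j < (c ++ p).length := pvFindClose_some_lt _ _ _ hc'
        have hf : pvFindClose (c ++ (p ++ ps'.flatten)) none 0 = some j := by
          have := pvFindClose_append_some (c ++ p) ps'.flatten none j hc'
          simpa [List.append_assoc] using this
        rw [hA, if_pos rfl, hf]
        simp only [pvCut]
        rw [if_pos (by simp at hlt ⊢; omega)]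
        have : c ++ (p ++ ps'.flatten) = (c ++ p) ++ ps'.flatten := by
          simp [List.append_assoc]
        rw [this, ← List.length_append, List.take_left]

-- ===== VERDICT (by name: the statement is the Claim_ definition above) =====
theorem extract_full_tag_spec : Claim_equal_extract_full_tag := by
  intro lines start_idx start_col _ _
  unfold Spec_extract_full_tag extract_full_tag extract_full_tag_alt
  rw [pvLoopA_eq_loopP, pvLoopP_eq_staged _ [] rfl]
  simp only [List.nil_append, List.length_nil]
  rcases pvFindClose _ none 0 with _ | j <;> rfl
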